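-- pv_equiv track=rewrite | github.com/FRESH-TUNA/Algorithm | 그리디/https:/www.acmicpc.net/problem/14499.py | solution
-- ===== SOURCE A (Python) =====
-- def solution(classes, main, sub):
--     db = [0] * (1000000+1)
--     ans = 0
--
--     for _class in classes:
--         if db[_class]:
--             ans += db[_class]
--             continue
--
--         remain = _class - main
--         _ans = 1
--
--         if remain > 0:
--             _ans, remain = _ans + remain // sub, remain % sub
--
--         if remain > 0: _ans += 1
--
--         db[_class] = _ans
--         ans += db[_class]
--
--     return ans
-- ===== SOURCE B (Python) =====
-- def solution(classes, main, sub):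
--     # sort once, then a single scan: equal classes are adjacent, so their
--     # arithmetic value is computed once per run and reused via `prev`
--     total = 0
--     prev = None
--     v = 0
--     for c in sorted(classes):
--         if c != prev:
--             remain = c - main
--             v = 1
--             if remain > 0:
--                 v += remain // sub
--                 if remain % sub > 0:
--                     v += 1
--             prev = c
--         total += v
--     return total
-- ===== Notes on version B (the rewrite author's own statement) =====
-- stated objective: alternative
-- what changed: Replaces the 1000001-slot memo array and per-occurrence random-access lookups with sort-then-scan: the list is sorted once so equal classes are adjacent, and the ceil-division value is computed once per run of duplicates and reused through the previous-element variable.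
-- outside the precondition, e.g. on solution([5, -999996], 0, 1): A returns 12, B returns 7
import Mathlib
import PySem

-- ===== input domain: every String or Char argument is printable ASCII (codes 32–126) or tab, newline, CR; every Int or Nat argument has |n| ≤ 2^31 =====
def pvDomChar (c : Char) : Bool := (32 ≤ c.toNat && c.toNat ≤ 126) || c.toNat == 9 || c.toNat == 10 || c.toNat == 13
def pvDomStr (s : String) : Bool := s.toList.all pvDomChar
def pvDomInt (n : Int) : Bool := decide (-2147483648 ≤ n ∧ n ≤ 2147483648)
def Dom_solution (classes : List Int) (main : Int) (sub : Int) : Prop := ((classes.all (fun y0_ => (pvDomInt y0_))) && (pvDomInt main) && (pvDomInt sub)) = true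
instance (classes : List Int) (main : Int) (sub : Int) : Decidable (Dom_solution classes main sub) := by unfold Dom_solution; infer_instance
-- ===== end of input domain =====

-- B replaces A's 1000001-slot memo array and random-access memo lookups by sort-then-scan:
-- equal classes become adjacent, so the value is computed once per run and reused.

-- ===== PORT A =====
-- A's `db = [0]*(1000000+1)` is modelled as a map with default 0 keyed by the Python list
-- index: `db[c]` with c < 0 wraps to c + 1000001 (exact under Pre_, which keeps indices in range).
def pvSlot (c : Int) : Int := if c < 0 then c + 1000001 else c

def solution (classes : List Int) (main : Int) (sub : Int) : Int :=
  (classes.foldl (fun (st : PySem.Dict Int Int × Int) c =>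
      let db := st.1
      let ans := st.2
      let cur := db.getD (pvSlot c) 0
      if cur ≠ 0 then (db, ans + cur)
      else
        let remain := c - main
        let p := if remain > 0 then (1 + PySem.Int.floordiv remain sub, PySem.Int.mod remain sub)
                 else ((1 : Int), remain)
        let a3 := if p.2 > 0 then p.1 + 1 else p.1
        (db.insert (pvSlot c) a3, ans + a3))
    (PySem.Dict.empty, 0)).2

-- ===== PORT B =====
-- state = (total, prev : Option Int, v); fold over sorted(classes)
def solution_alt (classes : List Int) (main : Int) (sub : Int) : Int :=
  ((PySem.List.sorted classes (fun x => x) false).foldl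
    (fun (st : Int × Option Int × Int) c =>
      if some c ≠ st.2.1 then
        let remain := c - main
        let v : Int :=
          if remain > 0 then
            let v1 := 1 + PySem.Int.floordiv remain sub
            if PySem.Int.mod remain sub > 0 then v1 + 1 else v1
          else 1
        (st.1 + v, some c, v)
      else (st.1 + st.2.2, st.2.1, st.2.2))
    (0, none, 0)).1

-- ===== PRECONDITION & SPEC =====
-- Pre_ admits exactly the inputs where Python A returns a value that is the function's own:
-- every class is a valid (possibly negative) index into the 1000001-slot list, the division by
-- `sub` is only reached when sub ≠ 0, and — the one exclusion of inputs A returns on — no list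
-- contains both a negative class and its wraparound alias class + 1000001: there A's negative
-- index reuses that slot's memoised value for a different class, an array-aliasing artefact of
-- the [0]*(10^6+1) memo that B does not reproduce.
def Pre_solution (classes : List Int) (main : Int) (sub : Int) : Prop :=
  (∀ c ∈ classes, -1000001 ≤ c ∧ c ≤ 1000000) ∧
  (sub ≠ 0 ∨ ∀ c ∈ classes, c - main ≤ 0) ∧
  (∀ c1 ∈ classes, ∀ c2 ∈ classes, c1 < 0 → 0 ≤ c2 → c2 ≠ c1 + 1000001)
instance (classes : List Int) (main : Int) (sub : Int) : Decidable (Pre_solution classes main sub) := by unfold Pre_solution; infer_instance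
def pvWitness_solution : List Int × Int × Int := ([1, 2, 2, 7], 3, 2)

def Spec_solution (classes : List Int) (main : Int) (sub : Int) (out : Int) : Prop := out = solution_alt classes main sub
instance (classes : List Int) (main : Int) (sub : Int) (out : Int) : Decidable (Spec_solution classes main sub out) := by unfold Spec_solution; infer_instance

-- ===== CLAIM (what is proved, stated in full; the proofs are below) =====
def Claim_equal_solution : Prop := ∀ (classes : List Int) (main : Int) (sub : Int), Dom_solution classes main sub → Pre_solution classes main sub → Spec_solution classes main sub (solution classes main sub)

-- ===== LEMMAS AND PROOFS =====

-- the per-class value both programs compute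
def pvVal (main sub c : Int) : Int :=
  if c - main ≤ 0 then 1
  else if PySem.Int.mod (c - main) sub > 0 then 1 + PySem.Int.floordiv (c - main) sub + 1
  else 1 + PySem.Int.floordiv (c - main) sub

-- A's arithmetic for a fresh class equals pvVal
lemma valA_eq (main sub c : Int) :
    (if (if c - main > 0 then (1 + PySem.Int.floordiv (c - main) sub, PySem.Int.mod (c - main) sub) else ((1 : Int), c - main)).2 > 0
     then (if c - main > 0 then (1 + PySem.Int.floordiv (c - main) sub, PySem.Int.mod (c - main) sub) else ((1 : Int), c - main)).1 + 1
     else (if c - main > 0 then (1 + PySem.Int.floordiv (c - main) sub, PySem.Int.mod (c - main) sub) else ((1 : Int), c - main)).1)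
      = pvVal main sub c := by
  by_cases h : c - main > 0
  · by_cases hm : PySem.Int.mod (c - main) sub > 0 <;>
      simp [pvVal, hm, show main < c from by omega, show ¬ (c - main ≤ 0) from by omega]
  · simp [pvVal, show ¬ main < c from by omega, show c - main ≤ 0 from by omega]

-- A's loop body, named for the proofs (definitionally the fold step of `solution`)
def stepA (main sub : Int) (st : PySem.Dict Int Int × Int) (c : Int) : PySem.Dict Int Int × Int :=
  let cur := st.1.getD (pvSlot c) 0
  if cur ≠ 0 then (st.1, st.2 + cur)
  else
    let remain := c - main
    let p := if remain > 0 then (1 + PySem.Int.floordiv remain sub, PySem.Int.mod remain sub)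
             else ((1 : Int), remain)
    let a3 := if p.2 > 0 then p.1 + 1 else p.1
    (st.1.insert (pvSlot c) a3, st.2 + a3)

lemma solution_eq_foldl (classes : List Int) (main sub : Int) :
    solution classes main sub = (classes.foldl (stepA main sub) (PySem.Dict.empty, 0)).2 := rfl

lemma stepA_eq (main sub : Int) (db : PySem.Dict Int Int) (ans c : Int) :
    stepA main sub (db, ans) c =
      if db.getD (pvSlot c) 0 ≠ 0 then (db, ans + db.getD (pvSlot c) 0)
      else (db.insert (pvSlot c) (pvVal main sub c), ans + pvVal main sub c) := by
  simp only [stepA, valA_eq]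

-- A's fold adds pvVal for every occurrence, as long as the memo is consistent and slots are injective.
lemma foldA (main sub : Int) :
    ∀ (l : List Int) (db : PySem.Dict Int Int) (ans : Int),
      (∀ c ∈ l, db.getD (pvSlot c) 0 = 0 ∨ db.getD (pvSlot c) 0 = pvVal main sub c) →
      (∀ c1 ∈ l, ∀ c2 ∈ l, pvSlot c1 = pvSlot c2 → c1 = c2) →
      (l.foldl (stepA main sub) (db, ans)).2 = ans + (l.map (pvVal main sub)).sum := by
  intro l
  induction l with
  | nil => intro db ans _ _; simp
  | cons c l ih =>
    intro db ans hmem hinj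
    simp only [List.foldl_cons, List.map_cons, List.sum_cons]
    rw [stepA_eq]
    by_cases hcur : db.getD (pvSlot c) 0 ≠ 0
    · have hv : db.getD (pvSlot c) 0 = pvVal main sub c := by
        rcases hmem c (by simp) with h | h
        · exact absurd h hcur
        · exact h
      rw [if_pos hcur]
      rw [ih db (ans + db.getD (pvSlot c) 0)
            (fun x hx => hmem x (by simp [hx]))
            (fun x hx y hy => hinj x (by simp [hx]) y (by simp [hy]))]
      rw [hv]; ring
    · rw [if_neg hcur]
      rw [ih]
      · ring
      · intro x hx
        rw [PySem.Dict.getD_insert]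
        by_cases hsl : pvSlot x = pvSlot c
        · have hxc : x = c := hinj x (by simp [hx]) c (by simp) hsl
          subst hxc
          rw [if_pos hsl]
          right; rfl
        · rw [if_neg hsl]
          exact hmem x (by simp [hx])
      · intro x hx y hy
        exact hinj x (by simp [hx]) y (by simp [hy])

-- B's loop body, named for the proofs
def stepB (main sub : Int) (st : Int × Option Int × Int) (c : Int) : Int × Option Int × Int :=
  if some c ≠ st.2.1 then
    let remain := c - main
    let v : Int :=
      if remain > 0 then
        let v1 := 1 + PySem.Int.floordiv remain sub
        if PySem.Int.mod remain sub > 0 then v1 + 1 else v1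
      else 1
    (st.1 + v, some c, v)
  else (st.1 + st.2.2, st.2.1, st.2.2)

-- B's fresh-branch arithmetic equals pvVal
lemma valB_eq (main sub c : Int) :
    (if c - main > 0 then
        let v1 := 1 + PySem.Int.floordiv (c - main) sub
        if PySem.Int.mod (c - main) sub > 0 then v1 + 1 else v1
      else (1 : Int)) = pvVal main sub c := by
  unfold pvVal
  split_ifs <;> first | rfl | omega

-- B's fold adds pvVal per element, whenever the cached v matches prev (order is irrelevant)
lemma foldB (main sub : Int) :
    ∀ (l : List Int) (t : Int) (pv : Option Int × Int),
      (∀ p, pv.1 = some p → pv.2 = pvVal main sub p) →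
      (l.foldl (stepB main sub) (t, pv)).1 = t + (l.map (pvVal main sub)).sum := by
  intro l
  induction l with
  | nil => intro t pv _; simp
  | cons c l ih =>
    intro t pv hpv
    simp only [List.foldl_cons, List.map_cons, List.sum_cons]
    by_cases h : some c ≠ pv.1
    · have hs : stepB main sub (t, pv) c = (t + pvVal main sub c, some c, pvVal main sub c) := by
        simp only [stepB, if_pos h, valB_eq]
      rw [hs, ih (t + pvVal main sub c) (some c, pvVal main sub c)
            (fun p hp => by cases hp; rfl)]
      ring
    · push_neg at h
      obtain ⟨p1, p2⟩ := pv
      have hv : p2 = pvVal main sub c := hpv c h.symm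
      rw [show stepB main sub (t, (p1, p2)) c = (t + p2, p1, p2) from by
            unfold stepB; rw [if_neg (fun hn => hn h)],
          ih (t + p2) (p1, p2) hpv, hv]
      ring

lemma solution_alt_eq_sum (classes : List Int) (main sub : Int) :
    solution_alt classes main sub = (classes.map (pvVal main sub)).sum := by
  unfold solution_alt
  have h : ((PySem.List.sorted classes (fun x => x) false).foldl (stepB main sub) (0, none, 0)).1
      = 0 + ((PySem.List.sorted classes (fun x => x) false).map (pvVal main sub)).sum :=
    foldB main sub _ 0 (none, 0) (by intro p hp; simp at hp)
  rw [show ((PySem.List.sorted classes (fun x => x) false).foldl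
        (fun (st : Int × Option Int × Int) c =>
          if some c ≠ st.2.1 then
            let remain := c - main
            let v : Int :=
              if remain > 0 then
                let v1 := 1 + PySem.Int.floordiv remain sub
                if PySem.Int.mod remain sub > 0 then v1 + 1 else v1
              else 1
            (st.1 + v, some c, v)
          else (st.1 + st.2.2, st.2.1, st.2.2)) (0, none, 0)).1
      = ((PySem.List.sorted classes (fun x => x) false).foldl (stepB main sub) (0, none, 0)).1 from rfl,
    h]
  simpa using List.Perm.sum_eq
    ((PySem.List.sorted_perm (xs := classes) (key := fun x => x) (rev := false)).map (pvVal main sub))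

-- ===== VERDICT (by name: the statement is the Claim_ definition above) =====
theorem solution_spec : Claim_equal_solution := by
  intro classes main sub _hdom hpre
  unfold Spec_solution
  have hinj : ∀ c1 ∈ classes, ∀ c2 ∈ classes, pvSlot c1 = pvSlot c2 → c1 = c2 := by
    intro c1 h1 c2 h2 hs
    have b1 := hpre.1 c1 h1
    have b2 := hpre.1 c2 h2
    have hna := hpre.2.2
    unfold pvSlot at hs
    by_cases s1 : c1 < 0 <;> by_cases s2 : c2 < 0 <;> simp [s1, s2] at hs
    · omega
    · exact absurd (by omega : c2 = c1 + 1000001) (hna c1 h1 c2 h2 s1 (by omega))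
    · exact absurd (by omega : c1 = c2 + 1000001) (hna c2 h2 c1 h1 s2 (by omega))
    · omega
  rw [solution_eq_foldl,
      foldA main sub classes PySem.Dict.empty 0
        (fun c _ => Or.inl (by simp [PySem.Dict.getD_empty])) hinj,
      solution_alt_eq_sum]
  ring
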